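-- pv_equiv track=rewrite | github.com/dys707/cipher | sdes_bruteforce.py | calculate_readability
-- ===== SOURCE A (Python) =====
-- def calculate_readability(bits):
--     """计算二进制数据的可读性分数"""
--     if len(bits) % 8 != 0:
--         return 0
--
--     score = 0
--     # 检查每个字节是否为可打印ASCII字符
--     for i in range(0, len(bits), 8):
--         byte = bits[i:i + 8]
--         char_code = int(''.join(map(str, byte)), 2)
--         if 32 <= char_code <= 126:  # 可打印ASCII字符
--             score += 1
--             # 给字母和数字更高的分数
--             if 65 <= char_code <= 90 or 97 <= char_code <= 122 or 48 <= char_code <= 57: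
--                 score += 1
--             # 给空格更高的分数（常见单词分隔符）
--             if char_code == 32:
--                 score += 1
--
--     return score
-- ===== SOURCE B (Python) =====
-- def calculate_readability(bits):
--     if len(bits) % 8 != 0:
--         return 0
--     codes = [sum(b << (7 - j) for j, b in enumerate(bits[i:i + 8]))
--              for i in range(0, len(bits), 8)]
--     printable = sum(1 for c in codes if 32 <= c <= 126)
--     bonus = sum(1 for c in codes if 48 <= c <= 57 or 65 <= c <= 90
--                 or 97 <= c <= 122 or c == 32)
--     return printable + bonus
-- ===== Notes on version B (the rewrite author's own statement) =====
-- stated objective: alternative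
-- what changed: B is staged: it first builds the whole list of byte codes via bit-shift accumulation over enumerated bits (no string join/parse), then computes the score as two independent counting passes (count of printable codes plus count of alnum-or-space codes), replacing A's single loop with nested per-byte conditional increments.
-- outside the precondition, e.g. on calculate_readability([0, 0, 10, 0, 0, 0, 0, 1]): A returns 2, B returns 0; on calculate_readability([2, 0, 0, 0, 0, 0, 0, 0]): A raises ValueError, B returns 0
import Mathlib
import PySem

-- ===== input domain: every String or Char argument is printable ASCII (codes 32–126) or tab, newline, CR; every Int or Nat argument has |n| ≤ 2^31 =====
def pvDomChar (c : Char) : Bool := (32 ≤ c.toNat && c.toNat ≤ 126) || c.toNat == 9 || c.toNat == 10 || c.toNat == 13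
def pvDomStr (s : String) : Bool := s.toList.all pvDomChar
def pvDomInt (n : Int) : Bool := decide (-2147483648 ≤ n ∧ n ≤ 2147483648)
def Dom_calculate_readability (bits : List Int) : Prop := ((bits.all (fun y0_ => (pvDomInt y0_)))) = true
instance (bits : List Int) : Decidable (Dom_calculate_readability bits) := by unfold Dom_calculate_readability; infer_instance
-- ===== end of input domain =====

set_option maxRecDepth 10000


-- B stages the computation: build the whole list of byte codes by bit-shift accumulation
-- (no string join/parse), then score it as two independent counting passes (alternative, not claimed faster).

-- ===== PORT A =====
-- per-chunk body of A's loop: char_code = int(''.join(map(str, byte)), 2); then the branch chain.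
-- none = the ValueError Python raises when the joined string is not a base-2 literal (outside Pre_).
def pvCharScore? (byte : List Int) : Option Int :=
  match PySem.Int.ofStrBase? (PySem.Str.join "" (byte.map PySem.Int.toStr)) 2 with
  | none => none
  | some char_code =>
      some (if 32 ≤ char_code ∧ char_code ≤ 126 then
              1 + (if (65 ≤ char_code ∧ char_code ≤ 90) ∨ (97 ≤ char_code ∧ char_code ≤ 122) ∨
                      (48 ≤ char_code ∧ char_code ≤ 57) then 1 else 0)
                + (if char_code = 32 then 1 else 0)
            else 0)

def calculate_readability (bits : List Int) : Int :=
  if PySem.Int.mod (bits.length : Int) 8 ≠ 0 then 0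
  else
    (((PySem.List.pyRange 0 (bits.length : Int) 8).foldl
      (fun (score : Option Int) i =>
        match score, pvCharScore? (PySem.List.slice bits (some i) (some (i + 8))) with
        | some s, some d => some (s + d)
        | _, _ => none) (some 0)).getD 0)

-- ===== PORT B =====
-- sum(b << (7 - j) for j, b in enumerate(byte))
def pvByteCode (byte : List Int) : Int :=
  ((PySem.List.enumerate byte).map (fun jb => jb.2 * 2 ^ (7 - jb.1).toNat)).sum

def pvPrintable (c : Int) : Bool := decide (32 ≤ c ∧ c ≤ 126)
def pvBonus (c : Int) : Bool :=
  decide ((48 ≤ c ∧ c ≤ 57) ∨ (65 ≤ c ∧ c ≤ 90) ∨ (97 ≤ c ∧ c ≤ 122) ∨ c = 32)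

def calculate_readability_alt (bits : List Int) : Int :=
  if PySem.Int.mod (bits.length : Int) 8 ≠ 0 then 0
  else
    let codes := (PySem.List.pyRange 0 (bits.length : Int) 8).map
      (fun i => pvByteCode (PySem.List.slice bits (some i) (some (i + 8))))
    (codes.countP pvPrintable : Int) + (codes.countP pvBonus : Int)

-- ===== PRECONDITION & SPEC =====
-- Pre_ excludes lists whose length is a multiple of 8 but whose elements are not all 0 or 1:
-- there A joins the elements' decimal digits and re-parses them in base 2 (raising ValueError,
-- or accidentally scoring a different bit string), while B's shift accumulation reads each
-- element as one bit; both behaviours on such malformed bit lists are accidental.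
def Pre_calculate_readability (bits : List Int) : Prop :=
  PySem.Int.mod (bits.length : Int) 8 ≠ 0 ∨ ∀ x ∈ bits, x = 0 ∨ x = 1
instance (bits : List Int) : Decidable (Pre_calculate_readability bits) := by
  unfold Pre_calculate_readability; infer_instance

def pvWitness_calculate_readability : List Int := [0, 1, 0, 0, 0, 0, 0, 1]

def Spec_calculate_readability (bits : List Int) (out : Int) : Prop := out = calculate_readability_alt bits
instance (bits : List Int) (out : Int) : Decidable (Spec_calculate_readability bits out) := by unfold Spec_calculate_readability; infer_instance

-- ===== CLAIM (what is proved, stated in full; the proofs are below) =====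
def Claim_equal_calculate_readability : Prop := ∀ (bits : List Int), Dom_calculate_readability bits → Pre_calculate_readability bits → Spec_calculate_readability bits (calculate_readability bits)

-- ===== LEMMAS AND PROOFS =====

-- key fact: on an 8-element 0/1 chunk, A's parse-and-branch score equals the sum of B's two indicators
lemma chunk_key (c : List Int) (h8 : c.length = 8) (h01 : ∀ x ∈ c, x = 0 ∨ x = 1) :
    pvCharScore? c
      = some ((if pvPrintable (pvByteCode c) then 1 else 0)
              + (if pvBonus (pvByteCode c) then 1 else 0)) := by
  rcases c with _|⟨b0,_|⟨b1,_|⟨b2,_|⟨b3,_|⟨b4,_|⟨b5,_|⟨b6,_|⟨b7,rest⟩⟩⟩⟩⟩⟩⟩⟩ <;>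
    simp only [List.length] at h8 <;> try omega
  rcases rest with _|⟨x,r⟩
  · have h0 := h01 b0 (by simp); have h1 := h01 b1 (by simp); have h2 := h01 b2 (by simp)
    have h3 := h01 b3 (by simp); have h4 := h01 b4 (by simp); have h5 := h01 b5 (by simp)
    have h6 := h01 b6 (by simp); have h7 := h01 b7 (by simp)
    rcases h0 with rfl|rfl <;> rcases h1 with rfl|rfl <;> rcases h2 with rfl|rfl <;>
      rcases h3 with rfl|rfl <;> rcases h4 with rfl|rfl <;> rcases h5 with rfl|rfl <;>
      rcases h6 with rfl|rfl <;> rcases h7 with rfl|rfl <;> decide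
  · simp at h8

-- A's option-fold, when every chunk is a well-formed byte, sums the two indicators
lemma foldA (L : List Int) (chunk : Int → List Int)
    (h : ∀ i ∈ L, (chunk i).length = 8 ∧ ∀ x ∈ chunk i, x = 0 ∨ x = 1) (s : Int) :
    L.foldl (fun (score : Option Int) i =>
        match score, pvCharScore? (chunk i) with
        | some t, some d => some (t + d)
        | _, _ => none) (some s)
      = some (s + (L.map (fun i =>
          (if pvPrintable (pvByteCode (chunk i)) then (1 : Int) else 0)
          + (if pvBonus (pvByteCode (chunk i)) then (1 : Int) else 0))).sum) := by
  induction L generalizing s with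
  | nil => simp
  | cons i L ih =>
      have hi := h i (by simp)
      have hrest : ∀ j ∈ L, (chunk j).length = 8 ∧ ∀ x ∈ chunk j, x = 0 ∨ x = 1 := by
        intro j hj; exact h j (by simp [hj])
      simp only [List.foldl_cons, chunk_key (chunk i) hi.1 hi.2, List.map_cons, List.sum_cons,
        ih hrest]
      congr 1
      ring

-- ===== VERDICT (by name: the statement is the Claim_ definition above) =====
theorem calculate_readability_spec : Claim_equal_calculate_readability := by
  intro bits _ hpre
  unfold Spec_calculate_readability calculate_readability calculate_readability_alt
  by_cases hg : PySem.Int.mod (bits.length : Int) 8 ≠ 0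
  · rw [if_pos hg, if_pos hg]
  · rw [if_neg hg, if_neg hg]
    rw [not_not] at hg
    have hall : ∀ x ∈ bits, x = 0 ∨ x = 1 := by
      rcases hpre with h | h
      · exact absurd hg h
      · exact h
    have hchunks : ∀ i ∈ PySem.List.pyRange 0 (bits.length : Int) 8,
        (PySem.List.slice bits (some i) (some (i + 8))).length = 8 ∧
        ∀ x ∈ PySem.List.slice bits (some i) (some (i + 8)), x = 0 ∨ x = 1 := by
      intro i hi
      rw [PySem.List.mem_pyRange_iff_of_pos (by norm_num)] at hi
      obtain ⟨hi0, hilt, hdvd⟩ := hi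
      have h8 : bits.length % 8 = 0 := by
        have hm := PySem.Int.mod_natCast bits.length 8
        push_cast at hm
        rw [hm] at hg
        exact_mod_cast hg
      have hile : i + 8 ≤ (bits.length : Int) := by omega
      have hjcast : i = ((i.toNat : Nat) : Int) := by omega
      have hslice : PySem.List.slice bits (some i) (some (i + 8))
          = List.take 8 (List.drop i.toNat bits) := by
        rw [hjcast]
        have := PySem.List.slice_natCast_add bits i.toNat 8
        push_cast at this ⊢
        exact this
      constructor
      · rw [hslice]
        simp only [List.length_take, List.length_drop]
        omega
      · intro x hx
        exact hall x (PySem.List.mem_of_mem_slice bits _ _ hx)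
    rw [foldA _ _ hchunks 0, zero_add]
    simp only [Option.getD_some]
    rw [show (fun i => (if pvPrintable (pvByteCode (PySem.List.slice bits (some i) (some (i + 8)))) then (1:Int) else 0)
          + (if pvBonus (pvByteCode (PySem.List.slice bits (some i) (some (i + 8)))) then (1:Int) else 0))
        = (fun i => ((fun c => if pvPrintable c then (1:Int) else 0)
            ((fun i => pvByteCode (PySem.List.slice bits (some i) (some (i + 8)))) i))
          + ((fun c => if pvBonus c then (1:Int) else 0)
            ((fun i => pvByteCode (PySem.List.slice bits (some i) (some (i + 8)))) i)) ) from rfl]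
    rw [PySem.List.sum_map_add_int]
    simp only [← Function.comp_def, ← List.map_map, PySem.List.sum_map_ite_one_zero,
      List.countP_map, Function.comp_assoc]
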